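-- pv_equiv track=rewrite | github.com/davidchan-emtelligent/word2vec | src/word2vec/helper.py | merge_token_count
-- ===== SOURCE A (Python) =====
-- from itertools import groupby
--
-- def merge_token_count(token_count_lst):
-- 	token_count = []
-- 	for t_cs in token_count_lst:
-- 		token_count += t_cs
--
-- 	token_count = sorted(token_count, key=lambda x: x[0])
-- 	merged = []
-- 	for k, g in groupby(token_count, lambda x: x[0]):
-- 		count = sum([ x[1] for x in g])
-- 		merged += [(k, count)]
--
-- 	return merged
-- ===== SOURCE B (Python) =====
-- def merge_token_count(token_count_lst):
--     totals = {}
--     for t_cs in token_count_lst: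
--         for t, c in t_cs:
--             totals[t] = totals.get(t, 0) + c
--     return sorted(totals.items(), key=lambda x: x[0])
-- ===== Notes on version B (the rewrite author's own statement) =====
-- stated objective: alternative
-- what changed: Replaces flatten + global sort + itertools.groupby with one-pass dict aggregation followed by a sort of the unique tokens only.
import Mathlib
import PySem

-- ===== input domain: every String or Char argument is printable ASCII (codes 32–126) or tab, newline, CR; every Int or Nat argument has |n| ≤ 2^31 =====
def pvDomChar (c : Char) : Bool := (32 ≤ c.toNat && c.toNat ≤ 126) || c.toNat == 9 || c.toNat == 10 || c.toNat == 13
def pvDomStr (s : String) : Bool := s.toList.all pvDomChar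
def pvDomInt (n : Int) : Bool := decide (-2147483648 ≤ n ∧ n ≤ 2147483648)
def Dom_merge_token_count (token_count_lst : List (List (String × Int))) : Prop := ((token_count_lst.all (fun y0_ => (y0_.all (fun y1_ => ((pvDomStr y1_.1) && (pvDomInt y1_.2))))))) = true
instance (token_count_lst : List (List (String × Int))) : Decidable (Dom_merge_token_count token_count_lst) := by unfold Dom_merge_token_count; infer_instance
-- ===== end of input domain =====

-- B replaces A's flatten + global sort + groupby with one-pass dict aggregation followed by a
-- sort of the unique tokens only; same return value everywhere (neither mutates its argument).

-- ===== PORT A =====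
-- 'for k, g in groupby(token_count, lambda x: x[0]): merged += [(k, sum([x[1] for x in g]))]'
-- ported as the standard structural recursion over maximal runs of consecutive equal keys.
def pvGroupSum : List (String × Int) → List (String × Int)
  | [] => []
  | (k, c) :: rest =>
      (k, (((k, c) :: rest.takeWhile (fun p => p.1 == k)).map (fun p => p.2)).sum)
        :: pvGroupSum (rest.dropWhile (fun p => p.1 == k))
  termination_by l => l.length
  decreasing_by
    simp only [List.length_cons]
    exact Nat.lt_succ_of_le (List.length_dropWhile_le _ _)

def merge_token_count (token_count_lst : List (List (String × Int))) : List (String × Int) :=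
  let token_count := token_count_lst.foldl (fun acc t_cs => acc ++ t_cs) []
  let token_count := PySem.List.sorted token_count (fun x => x.1) false
  pvGroupSum token_count

-- ===== PORT B =====
def merge_token_count_alt (token_count_lst : List (List (String × Int))) : List (String × Int) :=
  let totals : PySem.Dict String Int :=
    token_count_lst.foldl
      (fun d t_cs => t_cs.foldl (fun d p => d.insert p.1 (d.getD p.1 0 + p.2)) d)
      PySem.Dict.empty
  PySem.List.sorted totals.items (fun x => x.1) false

-- ===== PRECONDITION & SPEC =====
def Spec_merge_token_count (token_count_lst : List (List (String × Int))) (out : List (String × Int)) : Prop := out = merge_token_count_alt token_count_lst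
instance (token_count_lst : List (List (String × Int))) (out : List (String × Int)) : Decidable (Spec_merge_token_count token_count_lst out) := by unfold Spec_merge_token_count; infer_instance

-- ===== CLAIM (what is proved, stated in full; the proofs are below) =====
def Claim_equal_merge_token_count : Prop := ∀ (token_count_lst : List (List (String × Int))), Dom_merge_token_count token_count_lst → Spec_merge_token_count token_count_lst (merge_token_count token_count_lst)

-- ===== LEMMAS AND PROOFS =====

-- total count of a token in a flat (token, count) list
def pvW (L : List (String × Int)) (k : String) : Int :=
  ((L.filter (fun p => p.1 == k)).map (fun p => p.2)).sum

-- B's aggregation loop computes pvW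
theorem pvGetD_agg (L : List (String × Int)) (d : PySem.Dict String Int) (k : String) :
    (L.foldl (fun d p => d.insert p.1 (d.getD p.1 0 + p.2)) d).getD k 0 = d.getD k 0 + pvW L k := by
  induction L generalizing d with
  | nil => simp [pvW]
  | cons p L ih =>
      simp only [List.foldl_cons, ih, pvW, List.filter_cons]
      rw [PySem.Dict.getD_insert]
      by_cases h : k = p.1
      · simp [h]; ring
      · have hf : (p.1 == k) = false := by simp [Ne.symm h]
        simp [h, hf]

-- keys surviving the dropWhile of a key-sorted tail are strictly greater than k
theorem pvDropWhile_gt (rest : List (String × Int)) (k : String)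
    (hle : ∀ q ∈ rest, k ≤ q.1) (hp : rest.Pairwise (fun a b => a.1 ≤ b.1)) :
    ∀ q ∈ rest.dropWhile (fun p => p.1 == k), k < q.1 := by
  induction rest with
  | nil => simp
  | cons p rest ih =>
      simp only [List.dropWhile_cons]
      rcases List.pairwise_cons.1 hp with ⟨hhead, htail⟩
      by_cases h : p.1 = k
      · simp only [h, beq_self_eq_true, if_true]
        exact ih (fun q hq => hle q (List.mem_cons_of_mem _ hq)) htail
      · have hf : (p.1 == k) = false := by simp [h]
        simp only [hf, Bool.false_eq_true, if_false]
        intro q hq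
        rcases List.mem_cons.1 hq with rfl | hq'
        · exact lt_of_le_of_ne (hle q List.mem_cons_self) (fun e => h e.symm)
        · exact lt_of_lt_of_le
            (lt_of_le_of_ne (hle p List.mem_cons_self) (fun e => h e.symm)) (hhead q hq')

theorem pvFilter_self (k : String) (c : Int) (rest : List (String × Int))
    (hgt : ∀ q ∈ rest.dropWhile (fun p => p.1 == k), k < q.1) :
    ((k, c) :: rest).filter (fun p => p.1 == k) = (k, c) :: rest.takeWhile (fun p => p.1 == k) := by
  have hsplit : rest.takeWhile (fun p => p.1 == k) ++ rest.dropWhile (fun p => p.1 == k) = rest :=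
    List.takeWhile_append_dropWhile
  have h1 : (rest.takeWhile (fun p => p.1 == k)).filter (fun p => p.1 == k)
      = rest.takeWhile (fun p => p.1 == k) :=
    List.filter_eq_self.2 (fun a ha => List.mem_takeWhile_imp (p := fun q : String × Int => q.1 == k) ha)
  have h2 : (rest.dropWhile (fun p => p.1 == k)).filter (fun p => p.1 == k) = [] :=
    List.filter_eq_nil_iff.2 (fun a ha => by simpa using (hgt a ha).ne')
  calc ((k, c) :: rest).filter (fun p => p.1 == k)
      = (k, c) :: rest.filter (fun p => p.1 == k) := by simp
    _ = (k, c) :: rest.takeWhile (fun p => p.1 == k) := by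
        rw [← hsplit, List.filter_append, h1, h2, List.append_nil, hsplit]

theorem pvFilter_ne (k : String) (c : Int) (rest : List (String × Int)) (x : String) (hx : x ≠ k) :
    ((k, c) :: rest).filter (fun p => p.1 == x)
      = (rest.dropWhile (fun p => p.1 == k)).filter (fun p => p.1 == x) := by
  have hsplit : rest.takeWhile (fun p => p.1 == k) ++ rest.dropWhile (fun p => p.1 == k) = rest :=
    List.takeWhile_append_dropWhile
  have h1 : (rest.takeWhile (fun p => p.1 == k)).filter (fun p => p.1 == x) = [] :=
    List.filter_eq_nil_iff.2 (fun a ha => by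
      have : a.1 = k := by simpa using List.mem_takeWhile_imp (p := fun q : String × Int => q.1 == k) ha
      simp [this, Ne.symm hx])
  calc ((k, c) :: rest).filter (fun p => p.1 == x)
      = rest.filter (fun p => p.1 == x) := by simp [Ne.symm hx]
    _ = _ := by rw [← hsplit, List.filter_append, h1, List.nil_append, List.takeWhile_append_dropWhile]

-- membership characterisation of A's groupby-sum on a key-sorted list
theorem pvGroupSum_mem (S : List (String × Int)) (hp : S.Pairwise (fun a b => a.1 ≤ b.1)) :
    ∀ p : String × Int, p ∈ pvGroupSum S ↔ (p.1 ∈ S.map (fun q => q.1) ∧ p.2 = pvW S p.1) := by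
  induction S using pvGroupSum.induct with
  | case1 => simp [pvGroupSum, pvW]
  | case2 k c rest ih =>
      rcases List.pairwise_cons.1 hp with ⟨hhead, htail⟩
      have hle : ∀ q ∈ rest, k ≤ q.1 := hhead
      have hT : (rest.dropWhile (fun p => p.1 == k)).Pairwise (fun a b => a.1 ≤ b.1) :=
        List.Pairwise.sublist (List.dropWhile_sublist _) htail
      have hgt := pvDropWhile_gt rest k hle htail
      have ihT := ih hT
      have hWk : pvW ((k, c) :: rest) k
          = (((k, c) :: rest.takeWhile (fun p => p.1 == k)).map (fun p => p.2)).sum := by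
        simp [pvW, pvFilter_self k c rest hgt]
      have hWx : ∀ x, x ≠ k → pvW ((k, c) :: rest) x = pvW (rest.dropWhile (fun p => p.1 == k)) x := by
        intro x hx; simp [pvW, pvFilter_ne k c rest x hx]
      intro p
      rw [pvGroupSum]
      constructor
      · intro hm
        rcases List.mem_cons.1 hm with rfl | hm'
        · exact ⟨by simp, by rw [hWk]⟩
        · rcases (ihT p).1 hm' with ⟨hk1, hval⟩
          rcases List.mem_map.1 hk1 with ⟨q, hq, hq1⟩
          have hpk : k < p.1 := hq1 ▸ hgt q hq
          refine ⟨?_, ?_⟩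
          · have : q ∈ rest := (List.dropWhile_sublist _).mem hq
            exact List.mem_map.2 ⟨q, List.mem_cons_of_mem _ this, hq1⟩
          · rw [hWx p.1 hpk.ne', hval]
      · rintro ⟨hk1, hval⟩
        by_cases hpk : p.1 = k
        · apply List.mem_cons.2; left
          have : p = (p.1, p.2) := rfl
          rw [this, hpk, Prod.mk.injEq]
          exact ⟨rfl, by rw [hval, hpk, hWk]⟩
        · apply List.mem_cons.2; right
          apply (ihT p).2
          refine ⟨?_, by rw [hval, hWx p.1 hpk]⟩
          rcases List.mem_map.1 hk1 with ⟨q, hq, hq1⟩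
          rcases List.mem_cons.1 hq with rfl | hq'
          · exact absurd hq1.symm (by simpa using hpk)
          · have : q ∈ rest.takeWhile (fun p => p.1 == k) ++ rest.dropWhile (fun p => p.1 == k) := by
              rw [List.takeWhile_append_dropWhile]; exact hq'
            rcases List.mem_append.1 this with htw | hdw
            · have : q.1 = k := by
                simpa using List.mem_takeWhile_imp (p := fun q : String × Int => q.1 == k) htw
              exact absurd (hq1 ▸ this : p.1 = k) hpk
            · exact List.mem_map.2 ⟨q, hdw, hq1⟩

theorem pvGroupSum_pairwise (S : List (String × Int)) (hp : S.Pairwise (fun a b => a.1 ≤ b.1)) :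
    (pvGroupSum S).Pairwise (fun a b => a.1 < b.1) := by
  induction S using pvGroupSum.induct with
  | case1 => simp [pvGroupSum]
  | case2 k c rest ih =>
      rcases List.pairwise_cons.1 hp with ⟨hhead, htail⟩
      have hT : (rest.dropWhile (fun p => p.1 == k)).Pairwise (fun a b => a.1 ≤ b.1) :=
        List.Pairwise.sublist (List.dropWhile_sublist _) htail
      have hgt := pvDropWhile_gt rest k hhead htail
      rw [pvGroupSum]
      refine List.pairwise_cons.2 ⟨?_, ih hT⟩
      intro p hm
      rcases (pvGroupSum_mem _ hT p).1 hm with ⟨hk1, _⟩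
      rcases List.mem_map.1 hk1 with ⟨q, hq, hq1⟩
      exact hq1 ▸ hgt q hq

theorem pv_main (tcl : List (List (String × Int))) :
    merge_token_count tcl = merge_token_count_alt tcl := by
  have hflat : tcl.foldl (fun acc t_cs => acc ++ t_cs) [] = tcl.flatten := by
    have := PySem.List.foldl_append_eq_flatMap (fun x : List (String × Int) => x) tcl []
    simpa using this
  set L := tcl.flatten with hL
  set S := PySem.List.sorted L (fun x : String × Int => x.1) false with hS
  have hpS : S.Pairwise (fun a b => a.1 ≤ b.1) := PySem.List.sorted_pairwise L (fun x => x.1)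
  have hSperm : S.Perm L := PySem.List.sorted_perm L (fun x => x.1) false
  set step := fun (d : PySem.Dict String Int) (p : String × Int) => d.insert p.1 (d.getD p.1 0 + p.2) with hstep
  have hnest : tcl.foldl (fun d t_cs => t_cs.foldl step d) PySem.Dict.empty = L.foldl step PySem.Dict.empty :=
    (List.foldl_flatten ..).symm
  set d := L.foldl step PySem.Dict.empty with hd
  have hkeys : d.keys = PySem.Set.ofList (L.map (fun p => p.1)) := by
    rw [hd, hstep]
    rw [PySem.Dict.keys_foldl_insert_key L (fun p => p.1) (fun d p => d.getD p.1 0 + p.2) PySem.Dict.empty]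
    rw [PySem.Dict.keys_empty, PySem.Set.update_nil_left]
  have hnodup : d.keys.Nodup := by rw [hkeys]; exact PySem.Set.nodup_ofList _
  have hgetD : ∀ k, d.getD k 0 = pvW L k := by
    intro k; rw [hd, hstep, pvGetD_agg, PySem.Dict.getD_empty]; ring
  have hitems : d.items = (PySem.Set.ofList (L.map (fun p => p.1))).map (fun k => (k, pvW L k)) := by
    rw [PySem.Dict.items_eq_map_keys d hnodup 0, hkeys]
    exact List.map_congr_left (fun k _ => by rw [hgetD k])
  have hW : ∀ k, pvW S k = pvW L k := by
    intro k
    exact List.Perm.sum_eq (List.Perm.map _ (List.Perm.filter _ hSperm))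
  have hpw := pvGroupSum_pairwise S hpS
  have hnA : (pvGroupSum S).Nodup :=
    hpw.imp (fun {a b} (h : a.1 < b.1) => fun e => absurd (congrArg Prod.fst e) (ne_of_lt h))
  have hnB : d.items.Nodup := by
    rw [hitems]
    exact List.Nodup.map (fun a b e => by simpa using congrArg Prod.fst e) (PySem.Set.nodup_ofList _)
  have hperm : (pvGroupSum S).Perm d.items := by
    refine (List.perm_ext_iff_of_nodup hnA hnB).2 ?_
    intro p
    rw [pvGroupSum_mem S hpS p, hitems]
    constructor
    · rintro ⟨hk1, hval⟩
      refine List.mem_map.2 ⟨p.1, ?_, ?_⟩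
      · rw [PySem.Set.mem_ofList]
        exact (List.Perm.mem_iff (List.Perm.map _ hSperm)).1 hk1
      · have : p = (p.1, p.2) := rfl
        rw [this, hval, hW]
    · intro hm
      rcases List.mem_map.1 hm with ⟨k, hk, hkp⟩
      rw [PySem.Set.mem_ofList] at hk
      refine ⟨?_, ?_⟩
      · rw [← hkp]
        exact (List.Perm.mem_iff (List.Perm.map _ hSperm)).2 hk
      · rw [← hkp]; simp [hW]
  have hA : merge_token_count tcl = pvGroupSum S := by
    show pvGroupSum (PySem.List.sorted (tcl.foldl (fun acc t_cs => acc ++ t_cs) []) (fun x => x.1) false) = pvGroupSum S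
    rw [hflat]
  have hB : merge_token_count_alt tcl = PySem.List.sorted d.items (fun x : String × Int => x.1) false := by
    show PySem.List.sorted (tcl.foldl (fun d t_cs => t_cs.foldl step d) PySem.Dict.empty).items (fun x => x.1) false = _
    rw [hnest]
  rw [hA, hB]
  exact (PySem.List.sorted_eq_of_perm_of_pairwise_lt d.items (pvGroupSum S) (fun x => x.1) hperm hpw).symm

-- ===== VERDICT (by name: the statement is the Claim_ definition above) =====
theorem merge_token_count_spec : Claim_equal_merge_token_count := by
  intro tcl _
  exact pv_main tcl
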